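-- pv_equiv track=rewrite | github.com/Nick22ll/Architecture-Neural-Search | DARTS/OSpace.py | generateO
-- ===== SOURCE A (Python) =====
-- def generateO(parameters):
--     O = [f"{k}${value}$" for k in list(parameters.keys())[:1] for value in parameters[k]]
--
--     for key in list(parameters.keys())[1:]:
--         list1 = list(O)
--         O = []
--         list2 = parameters[key]
--         for i in range(len(list1)):
--             if key == "channels" and "operation$3" not in list1[i]:
--                 O.append(list1[i])
--             elif "operation$0" in list1[i]:
--                 O.append(list1[i])
--             elif "operation$4" in list1[i]:
--                 O.append(list1[i])
--             else:
--                 for j in range(len(list2)):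
--                     O.append(f"{list1[i]}{key}${list2[j]}$")
--     return O
-- ===== SOURCE B (Python) =====
-- def generateO(parameters):
--     items = list(parameters.items())
--
--     def skip(key, prefix):
--         return (key == "channels" and "operation$3" not in prefix) \
--             or "operation$0" in prefix or "operation$4" in prefix
--
--     def build(prefix, idx):
--         if idx == len(items):
--             return [prefix]
--         key, values = items[idx]
--         if skip(key, prefix):
--             return build(prefix, idx + 1)
--         out = []
--         for v in values:
--             out += build(f"{prefix}{key}${v}$", idx + 1)
--         return out
--
--     if not items:
--         return []
--     k, values = items[0]
--     out = []
--     for v in values: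
--         out += build(f"{k}${v}$", 1)
--     return out
-- ===== Notes on version B (the rewrite author's own statement) =====
-- stated objective: alternative
-- what changed: Replaces A's iterative level-by-level rebuilding of the whole combination list (copy O, clear, re-append per key) with a recursive depth-first build over the key list that extends one prefix at a time; same output order.
import Mathlib
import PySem

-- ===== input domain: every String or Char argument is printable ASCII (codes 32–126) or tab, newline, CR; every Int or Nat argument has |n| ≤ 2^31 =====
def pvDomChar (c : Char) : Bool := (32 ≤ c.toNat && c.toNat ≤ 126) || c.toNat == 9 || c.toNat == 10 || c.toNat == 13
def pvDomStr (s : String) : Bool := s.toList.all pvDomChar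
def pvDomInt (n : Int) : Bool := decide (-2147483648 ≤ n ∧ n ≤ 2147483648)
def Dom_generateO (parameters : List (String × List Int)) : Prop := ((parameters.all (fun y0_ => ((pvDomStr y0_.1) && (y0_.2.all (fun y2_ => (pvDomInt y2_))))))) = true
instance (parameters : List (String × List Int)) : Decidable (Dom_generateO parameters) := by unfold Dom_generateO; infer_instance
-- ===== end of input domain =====

-- B replaces A's level-by-level rebuilding of the combination list with a recursive
-- depth-first build over the key list (objective: alternative decomposition, same cost).

-- ===== PORT A =====
-- the dict argument is modelled as an assoc list; keys()/values are read through PySem.Dict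
def generateO (parameters : List (String × List Int)) : List String :=
  let items := (PySem.Dict.ofList parameters).items
  let O := (items.take 1).flatMap (fun kv => kv.2.map (fun v => kv.1 ++ "$" ++ PySem.Int.toStr v ++ "$"))
  (items.drop 1).foldl (fun O kv =>
    let key := kv.1
    let list1 := O
    let list2 := kv.2
    list1.foldl (fun acc s =>
      if key == "channels" && !(PySem.Str.isIn "operation$3" s) then acc ++ [s]
      else if PySem.Str.isIn "operation$0" s then acc ++ [s]
      else if PySem.Str.isIn "operation$4" s then acc ++ [s]
      else list2.foldl (fun acc v => acc ++ [s ++ key ++ "$" ++ PySem.Int.toStr v ++ "$"]) acc) []) O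

-- ===== PORT B =====
def pvSkip (key pfx : String) : Bool :=
  (key == "channels" && !(PySem.Str.isIn "operation$3" pfx))
  || PySem.Str.isIn "operation$0" pfx || PySem.Str.isIn "operation$4" pfx

def pvBuild (pfx : String) : List (String × List Int) → List String
  | [] => [pfx]
  | (k, vs) :: rest =>
      if pvSkip k pfx then pvBuild pfx rest
      else vs.flatMap (fun v => pvBuild (pfx ++ k ++ "$" ++ PySem.Int.toStr v ++ "$") rest)

def generateO_alt (parameters : List (String × List Int)) : List String :=
  match (PySem.Dict.ofList parameters).items with
  | [] => []
  | (k, vs) :: rest => vs.flatMap (fun v => pvBuild (k ++ "$" ++ PySem.Int.toStr v ++ "$") rest)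

-- ===== PRECONDITION & SPEC =====
def Spec_generateO (parameters : List (String × List Int)) (out : List String) : Prop := out = generateO_alt parameters
instance (parameters : List (String × List Int)) (out : List String) : Decidable (Spec_generateO parameters out) := by unfold Spec_generateO; infer_instance

-- ===== CLAIM (what is proved, stated in full; the proofs are below) =====
def Claim_equal_generateO : Prop := ∀ (parameters : List (String × List Int)), Dom_generateO parameters → Spec_generateO parameters (generateO parameters)

-- ===== LEMMAS AND PROOFS =====

-- the inner append loop of A is a map
lemma inner_foldl_eq_map (key : String) (s : String) (list2 : List Int) (acc : List String) :
    list2.foldl (fun acc v => acc ++ [s ++ key ++ "$" ++ PySem.Int.toStr v ++ "$"]) acc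
      = acc ++ list2.map (fun v => s ++ key ++ "$" ++ PySem.Int.toStr v ++ "$") := by
  induction list2 generalizing acc with
  | nil => simp
  | cons v vs ih => simp [ih]

-- one pass of A's outer loop turns O into a flatMap
lemma step_eq_flatMap (key : String) (list2 : List Int) (O acc : List String) :
    O.foldl (fun acc s =>
      if key == "channels" && !(PySem.Str.isIn "operation$3" s) then acc ++ [s]
      else if PySem.Str.isIn "operation$0" s then acc ++ [s]
      else if PySem.Str.isIn "operation$4" s then acc ++ [s]
      else list2.foldl (fun acc v => acc ++ [s ++ key ++ "$" ++ PySem.Int.toStr v ++ "$"]) acc) acc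
      = acc ++ O.flatMap (fun s =>
          if pvSkip key s then [s]
          else list2.map (fun v => s ++ key ++ "$" ++ PySem.Int.toStr v ++ "$")) := by
  induction O generalizing acc with
  | nil => simp
  | cons s O ih =>
    rw [List.foldl_cons, ih, List.flatMap_cons, inner_foldl_eq_map]
    simp only [pvSkip]
    split_ifs <;> simp_all

-- A's whole outer loop equals a DFS flatMap of pvBuild
lemma loop_eq_build (rest : List (String × List Int)) (O : List String) :
    rest.foldl (fun O kv =>
      let key := kv.1
      let list1 := O
      let list2 := kv.2
      list1.foldl (fun acc s =>
        if key == "channels" && !(PySem.Str.isIn "operation$3" s) then acc ++ [s]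
        else if PySem.Str.isIn "operation$0" s then acc ++ [s]
        else if PySem.Str.isIn "operation$4" s then acc ++ [s]
        else list2.foldl (fun acc v => acc ++ [s ++ key ++ "$" ++ PySem.Int.toStr v ++ "$"]) acc) []) O
      = O.flatMap (fun p => pvBuild p rest) := by
  induction rest generalizing O with
  | nil => simp [pvBuild]
  | cons kv rest ih =>
    obtain ⟨key, list2⟩ := kv
    simp only [List.foldl_cons]
    rw [ih, step_eq_flatMap, List.nil_append, List.flatMap_assoc]
    congr 1
    funext s
    by_cases h : pvSkip key s = true
    · simp [h, pvBuild]
    · simp [h, pvBuild, List.flatMap_map]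

-- ===== VERDICT (by name: the statement is the Claim_ definition above) =====
theorem generateO_spec : Claim_equal_generateO := by
  intro parameters _
  unfold Spec_generateO generateO generateO_alt
  cases h : (PySem.Dict.ofList parameters).items with
  | nil => simp
  | cons kv rest =>
    obtain ⟨k, vs⟩ := kv
    simp only [List.take_succ_cons, List.take_zero, List.drop_succ_cons, List.drop_zero,
      List.flatMap_cons, List.flatMap_nil, List.append_nil]
    rw [loop_eq_build, List.flatMap_map]
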